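-- pv_equiv track=rewrite | github.com/pramodreddypandiri/job-apply | backend/agents/deduplicator.py | normalise_title
-- ===== SOURCE A (Python) =====
-- def normalise_title(title: str) -> str:
--     """Remove seniority prefix and normalise title."""
--     title = title.lower().strip()
--     prefixes = ["senior ", "sr ", "sr. ", "staff ", "principal ", "lead ", "junior ", "jr ", "jr. "]
--     for prefix in prefixes:
--         if title.startswith(prefix):
--             title = title[len(prefix):]
--             break
--     return title.strip()
-- ===== SOURCE B (Python) =====
-- _SENIORITY = frozenset({"senior", "sr", "sr.", "staff", "principal", "lead", "junior", "jr", "jr."})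
--
--
-- def normalise_title(title: str) -> str:
--     """Remove seniority prefix and normalise title."""
--     t = title.lower().strip()
--     head, sep, rest = t.partition(" ")
--     if sep and head in _SENIORITY:
--         return rest.strip()
--     return t
-- ===== Notes on version B (the rewrite author's own statement) =====
-- stated objective: alternative
-- what changed: B replaces A's loop of nine startswith probes (each rescanning the title's head) by a single partition of the lowered/stripped title at its first space followed by one frozenset membership test of the first word.
import Mathlib
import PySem

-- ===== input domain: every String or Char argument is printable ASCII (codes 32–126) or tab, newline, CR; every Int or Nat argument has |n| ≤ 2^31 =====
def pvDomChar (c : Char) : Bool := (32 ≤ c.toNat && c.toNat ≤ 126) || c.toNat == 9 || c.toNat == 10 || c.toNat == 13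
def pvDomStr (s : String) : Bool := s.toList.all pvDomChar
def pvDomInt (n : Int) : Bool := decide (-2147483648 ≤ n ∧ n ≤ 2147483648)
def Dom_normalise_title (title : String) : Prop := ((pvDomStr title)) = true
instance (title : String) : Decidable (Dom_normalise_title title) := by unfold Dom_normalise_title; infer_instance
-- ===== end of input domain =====

-- B replaces A's nine startswith probes over the lowered title by a single partition at the
-- first space plus one set-membership test of the first word (objective: alternative/idiomatic).

-- ===== PORT A =====
-- the literal prefix list of A, as char lists (each is "<word> ")
def pvPrefixesA : List (List Char) :=
  [['s','e','n','i','o','r',' '], ['s','r',' '], ['s','r','.',' '], ['s','t','a','f','f',' '],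
   ['p','r','i','n','c','i','p','a','l',' '], ['l','e','a','d',' '], ['j','u','n','i','o','r',' '],
   ['j','r',' '], ['j','r','.',' ']]

-- A's for-loop with break: the first matching prefix is removed (title[len(prefix):]), then stop
def pvScanA (t : List Char) : List (List Char) → List Char
  | [] => t
  | p :: ps =>
    if PySem.Chars.startswith t p then PySem.List.slice t (some (p.length : Int)) none
    else pvScanA t ps

def normalise_title (title : String) : String :=
  String.ofList (PySem.Chars.strip (pvScanA (PySem.Chars.strip (PySem.Chars.lower title.toList)) pvPrefixesA))

-- ===== PORT B =====
-- the seniority words of Source B's frozenset (used for membership only, order irrelevant)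
def pvSeniority : List (List Char) :=
  [['s','e','n','i','o','r'], ['s','r'], ['s','r','.'], ['s','t','a','f','f'],
   ['p','r','i','n','c','i','p','a','l'], ['l','e','a','d'], ['j','u','n','i','o','r'],
   ['j','r'], ['j','r','.']]

-- hand port of t.partition(" ") (single-space separator), exact: (before, separator-found, after)
def pvPartSpace : List Char → List Char × Bool × List Char
  | [] => ([], false, [])
  | c :: cs =>
    if c = ' ' then ([], true, cs)
    else
      let r := pvPartSpace cs
      (c :: r.1, r.2.1, r.2.2)

def normalise_title_alt (title : String) : String :=
  let t := PySem.Chars.strip (PySem.Chars.lower title.toList)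
  let r := pvPartSpace t
  if r.2.1 && pvSeniority.contains r.1 then String.ofList (PySem.Chars.strip r.2.2)
  else String.ofList t

-- ===== PRECONDITION & SPEC =====
def Spec_normalise_title (title : String) (out : String) : Prop := out = normalise_title_alt title
instance (title : String) (out : String) : Decidable (Spec_normalise_title title out) := by unfold Spec_normalise_title; infer_instance

-- ===== CLAIM (what is proved, stated in full; the proofs are below) =====
def Claim_equal_normalise_title : Prop := ∀ (title : String), Dom_normalise_title title → Spec_normalise_title title (normalise_title title)

-- ===== LEMMAS AND PROOFS =====

-- if the separator was found, partition decomposes the input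
lemma pvPartSpace_found : ∀ t : List Char, (pvPartSpace t).2.1 = true →
    t = (pvPartSpace t).1 ++ ' ' :: (pvPartSpace t).2.2 := by
  intro t h
  induction t with
  | nil => simp [pvPartSpace] at h
  | cons c cs ih =>
    by_cases hc : c = ' '
    · simp [pvPartSpace, hc]
    · simp only [pvPartSpace, if_neg hc] at h ⊢
      simpa using ih h

-- startswith "<word> " holds exactly when partition found a space and the head is that word
lemma pvStartswith_part : ∀ (t w : List Char), (∀ c ∈ w, c ≠ ' ') →
    (PySem.Chars.startswith t (w ++ [' ']) =
      ((pvPartSpace t).2.1 && ((pvPartSpace t).1 == w))) := by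
  intro t
  induction t with
  | nil =>
    intro w _
    rw [Bool.eq_iff_iff]
    simp [pvPartSpace, PySem.Chars.startswith_iff]
  | cons c cs ih =>
    intro w hw
    by_cases hc : c = ' '
    · subst hc
      cases w with
      | nil =>
        rw [Bool.eq_iff_iff]
        simp [pvPartSpace, PySem.Chars.startswith_iff]
      | cons a w' =>
        have ha : a ≠ ' ' := hw a (by simp)
        rw [Bool.eq_iff_iff]
        simp [pvPartSpace, PySem.Chars.startswith_iff, List.cons_prefix_cons, ha]
    · cases w with
      | nil =>
        rw [Bool.eq_iff_iff]
        simp [pvPartSpace, hc, PySem.Chars.startswith_iff, List.cons_prefix_cons,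
          Ne.symm hc]
      | cons a w' =>
        have hw' : ∀ x ∈ w', x ≠ ' ' := fun x hx => hw x (by simp [hx])
        rw [Bool.eq_iff_iff]
        simp only [pvPartSpace, if_neg hc, List.cons_append, PySem.Chars.startswith_iff,
          List.cons_prefix_cons, Bool.and_eq_true, beq_iff_eq, List.cons.injEq]
        rw [← PySem.Chars.startswith_iff, ih w' hw']
        simp only [Bool.and_eq_true, beq_iff_eq]
        constructor
        · rintro ⟨rfl, hf, rfl⟩; exact ⟨hf, rfl, rfl⟩
        · rintro ⟨hf, rfl, rfl⟩; exact ⟨rfl, hf, rfl⟩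

-- a prefix of a list that survives dropWhile survives dropWhile itself
lemma dropWhile_eq_of_prefix {p : Char → Bool} {x y : List Char}
    (hx : x.dropWhile p = x) (hxy : y <+: x) : y.dropWhile p = y := by
  cases y with
  | nil => simp
  | cons a ys =>
    obtain ⟨k, hk⟩ := hxy
    have hpa : p a = false := by
      cases hpa2 : p a with
      | false => rfl
      | true =>
        exfalso
        have hx' : List.dropWhile p (a :: (ys ++ k)) = a :: (ys ++ k) := by
          rw [← List.cons_append, hk]; exact hx
        rw [List.dropWhile_cons_of_pos hpa2] at hx'
        have hle := List.length_dropWhile_le p (ys ++ k)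
        have hlen := congrArg List.length hx'
        rw [List.length_cons] at hlen
        omega
    simp [List.dropWhile_cons_of_neg, hpa]

lemma pvStrip_idem (s : List Char) :
    PySem.Chars.strip (PySem.Chars.strip s) = PySem.Chars.strip s := by
  simp only [PySem.Chars.strip, PySem.Chars.lstrip, PySem.Chars.rstrip]
  have hu : (s.dropWhile PySem.Chars.isspace).dropWhile PySem.Chars.isspace
      = s.dropWhile PySem.Chars.isspace := List.dropWhile_idempotent _ _
  set u := s.dropWhile PySem.Chars.isspace with hudef
  have hpre : ((u.reverse.dropWhile PySem.Chars.isspace).reverse) <+: u := by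
    have hsuf : u.reverse.dropWhile PySem.Chars.isspace <:+ u.reverse :=
      ⟨u.reverse.takeWhile PySem.Chars.isspace, List.takeWhile_append_dropWhile⟩
    have h2 := List.reverse_prefix.mpr (by simpa using hsuf)
    simpa using h2
  rw [dropWhile_eq_of_prefix hu hpre, List.reverse_reverse, List.dropWhile_idempotent]

-- the value of A's removal branch: dropping "<word> " leaves the partition remainder
lemma pvDropBranch (t w : List Char) (m : Int) (h0 : 0 ≤ m) (hn : m.toNat = w.length + 1)
    (hf : (pvPartSpace t).2.1 = true) (h1 : (pvPartSpace t).1 = w) :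
    PySem.List.slice t (some m) none = (pvPartSpace t).2.2 := by
  rw [PySem.List.slice_from t h0]
  have hd := pvPartSpace_found t hf
  rw [h1] at hd
  generalize hr : (pvPartSpace t).2.2 = r2 at hd ⊢
  rw [hn, hd, show w ++ ' ' :: r2 = (w ++ [' ']) ++ r2 from by simp]
  refine List.drop_left' ?_
  simp

-- A's prefix scan computes exactly B's partition-and-membership rule
set_option maxRecDepth 4096 in
lemma pvScanA_eq (t : List Char) :
    pvScanA t pvPrefixesA =
      (if (pvPartSpace t).2.1 && pvSeniority.contains (pvPartSpace t).1
       then (pvPartSpace t).2.2 else t) := by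
  have h1 := pvStartswith_part t ['s','e','n','i','o','r'] (by simp)
  have h2 := pvStartswith_part t ['s','r'] (by simp)
  have h3 := pvStartswith_part t ['s','r','.'] (by simp)
  have h4 := pvStartswith_part t ['s','t','a','f','f'] (by simp)
  have h5 := pvStartswith_part t ['p','r','i','n','c','i','p','a','l'] (by simp)
  have h6 := pvStartswith_part t ['l','e','a','d'] (by simp)
  have h7 := pvStartswith_part t ['j','u','n','i','o','r'] (by simp)
  have h8 := pvStartswith_part t ['j','r'] (by simp)
  have h9 := pvStartswith_part t ['j','r','.'] (by simp)
  simp only [List.cons_append, List.nil_append] at h1 h2 h3 h4 h5 h6 h7 h8 h9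
  simp only [pvScanA, pvPrefixesA, h1, h2, h3, h4, h5, h6, h7, h8, h9]
  by_cases hf : (pvPartSpace t).2.1 = true
  case neg =>
    have hf0 : (pvPartSpace t).2.1 = false := by simpa using hf
    simp [hf0]
  case pos =>
    by_cases e1 : (pvPartSpace t).1 = ['s','e','n','i','o','r']
    · simp [e1, pvSeniority, pvDropBranch t ['s','e','n','i','o','r'] 7 (by decide) (by decide) hf e1]
    · by_cases e2 : (pvPartSpace t).1 = ['s','r']
      · simp [e2, pvSeniority, pvDropBranch t ['s','r'] 3 (by decide) (by decide) hf e2]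
      · by_cases e3 : (pvPartSpace t).1 = ['s','r','.']
        · simp [e3, pvSeniority, pvDropBranch t ['s','r','.'] 4 (by decide) (by decide) hf e3]
        · by_cases e4 : (pvPartSpace t).1 = ['s','t','a','f','f']
          · simp [e4, pvSeniority, pvDropBranch t ['s','t','a','f','f'] 6 (by decide) (by decide) hf e4]
          · by_cases e5 : (pvPartSpace t).1 = ['p','r','i','n','c','i','p','a','l']
            · simp [e5, pvSeniority, pvDropBranch t ['p','r','i','n','c','i','p','a','l'] 10 (by decide) (by decide) hf e5]
            · by_cases e6 : (pvPartSpace t).1 = ['l','e','a','d']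
              · simp [e6, pvSeniority, pvDropBranch t ['l','e','a','d'] 5 (by decide) (by decide) hf e6]
              · by_cases e7 : (pvPartSpace t).1 = ['j','u','n','i','o','r']
                · simp [e7, pvSeniority,
                    pvDropBranch t ['j','u','n','i','o','r'] 7 (by decide) (by decide) hf e7]
                · by_cases e8 : (pvPartSpace t).1 = ['j','r']
                  · simp [e8, pvSeniority,
                      pvDropBranch t ['j','r'] 3 (by decide) (by decide) hf e8]
                  · by_cases e9 : (pvPartSpace t).1 = ['j','r','.']
                    · simp [e9, pvSeniority,
                        pvDropBranch t ['j','r','.'] 4 (by decide) (by decide) hf e9]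
                    · simp [e1, e2, e3, e4, e5, e6, e7, e8, e9, pvSeniority]

theorem pv_main (title : String) : normalise_title title = normalise_title_alt title := by
  simp only [normalise_title, normalise_title_alt]
  rw [pvScanA_eq]
  by_cases hc : ((pvPartSpace (PySem.Chars.strip (PySem.Chars.lower title.toList))).2.1 &&
      pvSeniority.contains (pvPartSpace (PySem.Chars.strip (PySem.Chars.lower title.toList))).1) = true
  · rw [if_pos hc, if_pos hc]
  · rw [if_neg hc, if_neg hc, pvStrip_idem]

-- ===== VERDICT (by name: the statement is the Claim_ definition above) =====
theorem normalise_title_spec : Claim_equal_normalise_title := by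
  intro title _
  unfold Spec_normalise_title
  exact pv_main title
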